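-- pv_equiv track=rewrite | github.com/achilles8work/Python_EDX_MIT | problem_set_1_3.py | longest_alphabet
-- ===== SOURCE A (Python) =====
-- def longest_alphabet(string):
--     count = 0
--     maxlen = 0
--     result = 0
--
--     for index in range(len(string)-1):
--         #increase the count when condition is true i.e substring is in alphabetical order,
--         #if condition fails counter is set to 0
--         if string[index] < string[index+1]:
--             count += 1
--
--             if count > maxlen:
--                 maxlen = count
--                 result = index + 1
--         else:
--             count = 0
--
--     startPosition = result - maxlen
--     return string[startPosition:result+1]
-- ===== SOURCE B (Python) =====
-- def longest_alphabet(string):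
--     if not string:
--         return ""
--     runs = []
--     cur = string[0]
--     for i in range(1, len(string)):
--         if string[i - 1] < string[i]:
--             cur += string[i]
--         else:
--             runs.append(cur)
--             cur = string[i]
--     runs.append(cur)
--     return max(runs, key=len)
-- ===== Notes on version B (the rewrite author's own statement) =====
-- stated objective: simpler
-- what changed: Replaces the counter/maxlen/end-index arithmetic and slice reconstruction with building the explicit list of maximal strictly-increasing runs and returning the first longest run via max(runs, key=len).
import Mathlib
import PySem

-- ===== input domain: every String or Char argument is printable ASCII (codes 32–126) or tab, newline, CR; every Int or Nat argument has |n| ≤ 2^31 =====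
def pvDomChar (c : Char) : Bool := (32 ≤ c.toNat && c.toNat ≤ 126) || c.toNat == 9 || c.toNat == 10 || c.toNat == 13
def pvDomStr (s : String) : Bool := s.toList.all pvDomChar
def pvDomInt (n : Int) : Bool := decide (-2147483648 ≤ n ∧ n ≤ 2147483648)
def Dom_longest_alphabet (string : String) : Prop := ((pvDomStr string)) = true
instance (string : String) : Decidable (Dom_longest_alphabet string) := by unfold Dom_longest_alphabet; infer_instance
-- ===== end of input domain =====

-- B rebuilds the answer as an explicit list of maximal strictly-increasing runs reduced by
-- first-longest, replacing A's counter/end-index arithmetic and slice reconstruction (objective: simpler).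

-- ===== PORT A =====
-- loop body of A's for-loop; pyGetD is exact here: every index the loop reads (index, index+1
-- for index in range(len-1)) is in range, so Python's s[index] never raises
def pvStepA (cs : List Char) (st : Int × Int × Int) (index : Int) : Int × Int × Int :=
  if PySem.List.pyGetD cs index ' ' < PySem.List.pyGetD cs (index + 1) ' ' then
    if st.1 + 1 > st.2.1 then (st.1 + 1, st.1 + 1, index + 1)
    else (st.1 + 1, st.2.1, st.2.2)
  else (0, st.2.1, st.2.2)

def longest_alphabet (string : String) : String :=
  let cs := string.toList
  let fin := (PySem.List.pyRange 0 ((cs.length : Int) - 1) 1).foldl (pvStepA cs) (0, 0, 0)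
  String.ofList (PySem.List.slice cs (some (fin.2.2 - fin.2.1)) (some (fin.2.2 + 1)))

-- ===== PORT B =====
-- B's loop: build the list of maximal strictly-increasing runs (cur = current run, prev = previous char)
def pvRuns (cur : List Char) (prev : Char) : List Char → List (List Char)
  | [] => [cur]
  | c :: rest => if prev < c then pvRuns (cur ++ [c]) c rest else cur :: pvRuns [c] c rest

def longest_alphabet_alt (string : String) : String :=
  match string.toList with
  | [] => ""
  | c :: rest =>
    match PySem.List.max? (pvRuns [c] c rest) (fun r => (r.length : Int)) with
    | some r => String.ofList r
    | none => ""

-- ===== PRECONDITION & SPEC =====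
def Spec_longest_alphabet (string : String) (out : String) : Prop := out = longest_alphabet_alt string
instance (string : String) (out : String) : Decidable (Spec_longest_alphabet string out) := by unfold Spec_longest_alphabet; infer_instance

-- ===== CLAIM (what is proved, stated in full; the proofs are below) =====
def Claim_equal_longest_alphabet : Prop := ∀ (string : String), Dom_longest_alphabet string → Spec_longest_alphabet string (longest_alphabet string)

-- ===== LEMMAS AND PROOFS =====

-- running "first longest" reduction (what max(·, key=len) computes after its first element)
def pvFB (b : List Char) (rs : List (List Char)) : List Char :=
  rs.foldl (fun m r => if m.length < r.length then r else m) b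

-- ghost version of A's loop carrying the current run and best run as lists
def pvG (prev : Char) (cur best : List Char) : List Char → List Char
  | [] => best
  | c :: rest =>
    if prev < c then
      if best.length < cur.length + 1 then pvG c (cur ++ [c]) (cur ++ [c]) rest
      else pvG c (cur ++ [c]) best rest
    else pvG c [c] best rest

lemma pv_foldl_fun_congr {α β : Type} (f g : β → α → β) (h : ∀ b a, f b a = g b a) :
    ∀ (l : List α) (b : β), List.foldl f b l = List.foldl g b l := by
  intro l
  induction l with
  | nil => intro b; rfl
  | cons x xs ih => intro b; rw [List.foldl_cons, List.foldl_cons, h, ih]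

lemma max?_cons_eq_pvFB (rs : List (List Char)) (r0 : List Char) :
    PySem.List.max? (r0 :: rs) (fun r => (r.length : Int)) = some (pvFB r0 rs) := by
  have key : ∀ (rs : List (List Char)) (b : List Char),
      List.foldl (fun acc x =>
        match acc with
        | none => some x
        | some m => if ((m.length : Int)) < ((x.length : Int)) then some x else some m)
        (some b) rs = some (pvFB b rs) := by
    intro rs
    induction rs with
    | nil => intro b; simp [pvFB]
    | cons r rs ih =>
      intro b
      rw [List.foldl_cons]
      show List.foldl _ (if ((b.length : Int)) < ((r.length : Int)) then some r else some b) rs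
        = some (pvFB b (r :: rs))
      have hp : pvFB b (r :: rs) = pvFB (if b.length < r.length then r else b) rs := by
        simp only [pvFB, List.foldl_cons]
      rw [hp]
      by_cases h : ((b.length : Int)) < ((r.length : Int))
      · have hn : b.length < r.length := by exact_mod_cast h
        rw [if_pos h, if_pos hn]; exact ih r
      · have hn : ¬ b.length < r.length := by exact_mod_cast h
        rw [if_neg h, if_neg hn]; exact ih b
  simp only [PySem.List.max?]
  refine (pv_foldl_fun_congr _ (fun acc x =>
      match acc with
      | none => some x
      | some m => if ((m.length : Int)) < ((x.length : Int)) then some x else some m)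
      (fun b a => by cases b <;> rfl) _ _).trans ?_
  rw [List.foldl_cons]
  exact key rs r0

lemma runs_head : ∀ (rest : List Char) (prev : Char) (cur : List Char),
    ∃ t rs, pvRuns cur prev rest = (cur ++ t) :: rs := by
  intro rest
  induction rest with
  | nil => intro prev cur; exact ⟨[], [], by simp [pvRuns]⟩
  | cons c r ih =>
    intro prev cur
    by_cases h : prev < c
    · obtain ⟨t, rs, ht⟩ := ih c (cur ++ [c])
      exact ⟨[c] ++ t, rs, by simp [pvRuns, h, ht]⟩
    · exact ⟨[], pvRuns [c] c r, by simp [pvRuns, h]⟩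

lemma pvFB_cons_absorb (x y : List Char) (rs : List (List Char))
    (h : x.length ≤ y.length) (h2 : x.length = y.length → x = y) :
    pvFB x (y :: rs) = pvFB y rs := by
  simp only [pvFB, List.foldl_cons]
  by_cases hlt : x.length < y.length
  · simp [hlt]
  · have : x.length = y.length := by omega
    simp [hlt]
    simp [h2 this]

lemma G_eq : ∀ (rest : List Char) (prev : Char) (cur best : List Char),
    1 ≤ best.length → cur.length ≤ best.length →
    pvG prev cur best rest = pvFB best (pvRuns cur prev rest) := by
  intro rest
  induction rest with
  | nil =>
    intro prev cur best _ hle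
    have hn : ¬ best.length < cur.length := by omega
    simp [pvG, pvRuns, pvFB, hn]
  | cons c r ih =>
    intro prev cur best hb hle
    by_cases h : prev < c
    · by_cases h2 : best.length < cur.length + 1
      · obtain ⟨t, rs, ht⟩ := runs_head r c (cur ++ [c])
        have e1 : pvFB best ((cur ++ [c] ++ t) :: rs) = pvFB (cur ++ [c] ++ t) rs := by
          apply pvFB_cons_absorb
          · simp; omega
          · intro hlen; exfalso; simp at hlen; omega
        have e2 : pvFB (cur ++ [c]) ((cur ++ [c] ++ t) :: rs) = pvFB (cur ++ [c] ++ t) rs := by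
          apply pvFB_cons_absorb
          · simp
          · intro hlen
            have : t = [] := by simp at hlen; simpa using hlen
            simp [this]
        have hih := ih c (cur ++ [c]) (cur ++ [c]) (by simp) (by simp)
        simp only [pvG, pvRuns, if_pos h, if_pos h2]
        rw [hih, ht, e2, ← e1, ← ht]
      · have hih := ih c (cur ++ [c]) best hb (by simp; omega)
        simp only [pvG, pvRuns, if_pos h, if_neg h2]
        rw [hih]
    · have hih := ih c [c] best hb (by simpa using hb)
      simp only [pvG, pvRuns, if_neg h]
      rw [hih]
      have hn : ¬ best.length < cur.length := by omega
      simp [pvFB, hn]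

lemma sliceSeg (p m t : List Char) :
    PySem.List.slice (p ++ (m ++ t)) (some (p.length : Int)) (some ((p.length : Int) + (m.length : Int))) = m := by
  have h : ((p.length : Int)) + ((m.length : Int)) = ((p.length + m.length : Nat) : Int) := by push_cast; ring
  rw [h, PySem.List.slice_natCast, List.drop_left]
  have h2 : p.length + m.length - p.length = m.length := by omega
  rw [h2, List.take_left]

lemma bridgeA : ∀ (rest pre pre' cur best : List Char) (prev : Char) (resIdx : Int),
    pre ++ [prev] = pre' ++ cur →
    PySem.List.slice (pre ++ prev :: rest) (some (resIdx - ((best.length : Int) - 1))) (some (resIdx + 1)) = best →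
    (fun fin => PySem.List.slice (pre ++ prev :: rest) (some (fin.2.2 - fin.2.1)) (some (fin.2.2 + 1)))
      ((PySem.List.pyRange (pre.length : Int) (((pre ++ prev :: rest).length : Int) - 1) 1).foldl
        (pvStepA (pre ++ prev :: rest)) ((cur.length : Int) - 1, (best.length : Int) - 1, resIdx))
      = pvG prev cur best rest := by
  intro rest
  induction rest with
  | nil =>
    intro pre pre' cur best prev resIdx _ hslice
    have hlen : (((pre ++ prev :: ([] : List Char)).length : Int)) - 1 = (pre.length : Int) := by simp
    rw [hlen, PySem.List.pyRange_one_eq_nil le_rfl]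
    simpa [pvG] using hslice
  | cons c r ih =>
    intro pre pre' cur best prev resIdx heq hslice
    have hlt : (pre.length : Int) < (((pre ++ prev :: c :: r).length : Int)) - 1 := by
      simp; omega
    rw [PySem.List.pyRange_one_cons hlt, List.foldl_cons]
    have hg1 : PySem.List.pyGetD (pre ++ prev :: c :: r) (pre.length : Int) ' ' = prev := by
      simp [PySem.List.pyGetD]
    have hg2 : PySem.List.pyGetD (pre ++ prev :: c :: r) ((pre.length : Int) + 1) ' ' = c := by
      have h1 : pre ++ prev :: c :: r = (pre ++ [prev]) ++ c :: r := by simp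
      have h2 : ((pre.length : Int)) + 1 = (((pre ++ [prev]).length : Nat) : Int) := by simp
      rw [h1, h2, PySem.List.pyGetD, PySem.List.pyGet?_append_length]
      rfl
    have hlenq : pre.length + 1 = pre'.length + cur.length := by
      have := congrArg List.length heq; simpa using this
    by_cases h : prev < c
    · by_cases h2 : best.length < cur.length + 1
      · -- current run extended and becomes the new best; result index moves to pre.length + 1
        have hstep : pvStepA (pre ++ prev :: c :: r) ((cur.length : Int) - 1, (best.length : Int) - 1, resIdx) (pre.length : Int)
            = (((cur ++ [c]).length : Int) - 1, ((cur ++ [c]).length : Int) - 1, ((pre ++ [prev]).length : Int)) := by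
          simp only [pvStepA, hg1, hg2, if_pos h]
          have hc : ((cur.length : Int)) - 1 + 1 > ((best.length : Int)) - 1 := by
            omega
          simp only [if_pos hc]
          simp
        rw [hstep]
        have hslice' : PySem.List.slice ((pre ++ [prev]) ++ c :: r)
            (some ((((pre ++ [prev]).length : Int)) - (((cur ++ [c]).length : Int) - 1)))
            (some (((pre ++ [prev]).length : Int) + 1)) = cur ++ [c] := by
          have hform : (pre ++ [prev]) ++ c :: r = pre' ++ ((cur ++ [c]) ++ r) := by
            rw [heq]; simp
          have e1 : (((pre ++ [prev]).length : Int)) - (((cur ++ [c]).length : Int) - 1) = (pre'.length : Int) := by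
            simp; omega
          have e2 : (((pre ++ [prev]).length : Int)) + 1 = (pre'.length : Int) + (((cur ++ [c]).length : Nat) : Int) := by
            simp; omega
          rw [hform, e1, e2]
          exact sliceSeg pre' (cur ++ [c]) r
        have heq' : (pre ++ [prev]) ++ [c] = pre' ++ (cur ++ [c]) := by rw [heq]; simp
        have hih := ih (pre ++ [prev]) pre' (cur ++ [c]) (cur ++ [c]) c ((pre ++ [prev]).length : Int) heq' hslice'
        simp only [pvG, if_pos h, if_pos h2]
        simpa [List.append_assoc, List.cons_append, List.nil_append, List.length_append,
          List.length_cons, List.length_nil, Nat.cast_add, Nat.cast_one] using hih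
      · have hstep : pvStepA (pre ++ prev :: c :: r) ((cur.length : Int) - 1, (best.length : Int) - 1, resIdx) (pre.length : Int)
            = (((cur ++ [c]).length : Int) - 1, (best.length : Int) - 1, resIdx) := by
          simp only [pvStepA, hg1, hg2, if_pos h]
          have hc : ¬ (((cur.length : Int)) - 1 + 1 > ((best.length : Int)) - 1) := by
            omega
          simp only [if_neg hc]
          simp
        rw [hstep]
        have heq' : (pre ++ [prev]) ++ [c] = pre' ++ (cur ++ [c]) := by rw [heq]; simp
        have hslice' : PySem.List.slice ((pre ++ [prev]) ++ c :: r)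
            (some (resIdx - ((best.length : Int) - 1))) (some (resIdx + 1)) = best := by
          rw [show (pre ++ [prev]) ++ c :: r = pre ++ prev :: c :: r by simp]
          exact hslice
        have hih := ih (pre ++ [prev]) pre' (cur ++ [c]) best c resIdx heq' hslice'
        simp only [pvG, if_pos h, if_neg h2]
        simpa [List.append_assoc, List.cons_append, List.nil_append, List.length_append,
          List.length_cons, List.length_nil, Nat.cast_add, Nat.cast_one] using hih
    · have hstep : pvStepA (pre ++ prev :: c :: r) ((cur.length : Int) - 1, (best.length : Int) - 1, resIdx) (pre.length : Int)
          = ((([c] : List Char).length : Int) - 1, (best.length : Int) - 1, resIdx) := by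
        simp only [pvStepA, hg1, hg2, if_neg h]
        simp
      rw [hstep]
      have hslice' : PySem.List.slice ((pre ++ [prev]) ++ c :: r)
          (some (resIdx - ((best.length : Int) - 1))) (some (resIdx + 1)) = best := by
        rw [show (pre ++ [prev]) ++ c :: r = pre ++ prev :: c :: r by simp]
        exact hslice
      have hih := ih (pre ++ [prev]) (pre ++ [prev]) [c] best c resIdx rfl hslice'
      simp only [pvG, if_neg h]
      simpa [List.append_assoc, List.cons_append, List.nil_append, List.length_append,
        List.length_cons, List.length_nil, Nat.cast_add, Nat.cast_one] using hih

-- ===== VERDICT (by name: the statement is the Claim_ definition above) =====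
theorem longest_alphabet_spec : Claim_equal_longest_alphabet := by
  intro string _
  show Spec_longest_alphabet string (longest_alphabet string)
  unfold Spec_longest_alphabet
  cases hcs : string.toList with
  | nil =>
    simp only [longest_alphabet, longest_alphabet_alt, hcs]
    decide
  | cons c rest =>
    have hA := bridgeA rest [] [] [c] [c] c 0 rfl
      (by simpa using sliceSeg ([] : List Char) [c] rest)
    obtain ⟨t, rs, ht⟩ := runs_head rest c [c]
    have hB : pvG c [c] [c] rest = pvFB ([c] ++ t) rs := by
      rw [G_eq rest c [c] [c] (by simp) le_rfl, ht]
      apply pvFB_cons_absorb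
      · simp
      · intro hlen
        have : t = [] := by simpa using hlen.symm
        simp [this]
    simp only [longest_alphabet, longest_alphabet_alt, hcs, ht, max?_cons_eq_pvFB]
    norm_num at hA
    have hb : (((c :: rest).length : Int)) - 1 = ((rest.length : Int)) := by simp
    rw [hb]
    exact congrArg String.ofList (hA.trans hB)
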